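-- pv_equiv track=rewrite | github.com/sticky-ai/Algorithms | arcade/the_core/volleyballPosition.py | volleyballPositions
-- ===== SOURCE A (Python) =====
-- def volleyballPositions(formation, k):
--
--     for i in range(k % 6):
--         temp = formation[0][1]
--         formation[0][1] = formation[1][2]
--         formation[1][2] = formation[3][2]
--         formation[3][2] = formation[2][1]
--         formation[2][1] = formation[3][0]
--         formation[3][0] = formation[1][0]
--         formation[1][0] = temp
--
--     return formation
-- ===== SOURCE B (Python) =====
-- def volleyballPositions(formation, k):
--     r = k % 6
--     if r == 0:
--         return formation
--     cells = [(0, 1), (1, 2), (3, 2), (2, 1), (3, 0), (1, 0)]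
--     vals = [formation[i][j] for i, j in cells]
--     vals = vals[r:] + vals[:r]
--     for (i, j), v in zip(cells, vals):
--         formation[i][j] = v
--     return formation
-- ===== Notes on version B (the rewrite author's own statement) =====
-- stated objective: simpler
-- what changed: B applies the 6-cycle's r-th power in one pass (read the six cycle cells, rotate the value list left by r = k % 6, write back) instead of performing r successive six-swap rotations.
import Mathlib
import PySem

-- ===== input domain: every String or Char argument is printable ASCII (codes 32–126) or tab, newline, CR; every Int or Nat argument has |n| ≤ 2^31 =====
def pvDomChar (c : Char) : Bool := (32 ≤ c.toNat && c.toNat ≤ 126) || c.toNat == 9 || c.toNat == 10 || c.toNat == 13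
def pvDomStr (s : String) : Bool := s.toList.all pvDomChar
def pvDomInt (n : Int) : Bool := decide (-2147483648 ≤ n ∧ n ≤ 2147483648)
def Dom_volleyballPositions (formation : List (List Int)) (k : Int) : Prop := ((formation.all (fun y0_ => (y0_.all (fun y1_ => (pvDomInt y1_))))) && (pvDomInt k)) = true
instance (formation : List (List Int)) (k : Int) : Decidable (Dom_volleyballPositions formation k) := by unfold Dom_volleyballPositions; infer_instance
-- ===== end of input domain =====

-- B changes the algorithm (one-pass rotation by r = k % 6 instead of r = k % 6 successive
-- six-swap rotations); both Pythons mutate `formation` in place identically, so the proved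
-- equivalence of the returned value covers the side effect as well.

-- ===== PORT A =====
-- formation[i][j]; pyGetD is Python's indexing on the in-range indices guaranteed by Pre_
-- (outside Pre_ the Python raises IndexError)
def vbG (f : List (List Int)) (i j : Int) : Int :=
  PySem.List.pyGetD (PySem.List.pyGetD f i []) j 0

-- formation[i][j] = v; pySetD is Python's index assignment on the in-range indices of Pre_
def vbS (f : List (List Int)) (i j : Int) (v : Int) : List (List Int) :=
  PySem.List.pySetD f i (PySem.List.pySetD (PySem.List.pyGetD f i []) j v)

-- one iteration of A's loop body, statement by statement
def vbStep (f : List (List Int)) : List (List Int) :=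
  let temp := vbG f 0 1
  let f := vbS f 0 1 (vbG f 1 2)
  let f := vbS f 1 2 (vbG f 3 2)
  let f := vbS f 3 2 (vbG f 2 1)
  let f := vbS f 2 1 (vbG f 3 0)
  let f := vbS f 3 0 (vbG f 1 0)
  vbS f 1 0 temp

def volleyballPositions (formation : List (List Int)) (k : Int) : List (List Int) :=
  (PySem.List.pyRange 0 (PySem.Int.mod k 6) 1).foldl (fun f _ => vbStep f) formation

-- ===== PORT B =====
def volleyballPositions_alt (formation : List (List Int)) (k : Int) : List (List Int) :=
  let r := PySem.Int.mod k 6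
  if r = 0 then formation
  else
    let cells : List (Int × Int) := [(0, 1), (1, 2), (3, 2), (2, 1), (3, 0), (1, 0)]
    let vals := cells.map (fun c =>
      PySem.List.pyGetD (PySem.List.pyGetD formation c.1 []) c.2 0)
    let vals := PySem.List.slice vals (some r) none ++ PySem.List.slice vals none (some r)
    (cells.zip vals).foldl (fun g cv =>
      PySem.List.pySetD g cv.1.1 (PySem.List.pySetD (PySem.List.pyGetD g cv.1.1 []) cv.1.2 cv.2))
      formation

-- ===== PRECONDITION & SPEC =====
-- Pre_ excludes exactly the inputs where A raises IndexError: when k % 6 ≠ 0 the formation must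
-- have at least the four rows, of the lengths the six indexed cells require (B raises there too).
def Pre_volleyballPositions (formation : List (List Int)) (k : Int) : Prop :=
  PySem.Int.mod k 6 = 0 ∨
    (4 ≤ formation.length ∧ 2 ≤ (formation.getD 0 []).length ∧
      3 ≤ (formation.getD 1 []).length ∧ 2 ≤ (formation.getD 2 []).length ∧
      3 ≤ (formation.getD 3 []).length)
instance (formation : List (List Int)) (k : Int) : Decidable (Pre_volleyballPositions formation k) := by
  unfold Pre_volleyballPositions; infer_instance

def pvWitness_volleyballPositions : List (List Int) × Int :=
  ([[1, 2], [3, 4, 5], [6, 7], [8, 9, 10]], 1)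

def Spec_volleyballPositions (formation : List (List Int)) (k : Int) (out : List (List Int)) : Prop := out = volleyballPositions_alt formation k
instance (formation : List (List Int)) (k : Int) (out : List (List Int)) : Decidable (Spec_volleyballPositions formation k out) := by unfold Spec_volleyballPositions; infer_instance

-- ===== CLAIM (what is proved, stated in full; the proofs are below) =====
def Claim_equal_volleyballPositions : Prop := ∀ (formation : List (List Int)) (k : Int), Dom_volleyballPositions formation k → Pre_volleyballPositions formation k → Spec_volleyballPositions formation k (volleyballPositions formation k)

-- ===== LEMMAS AND PROOFS =====
theorem pg1 {α : Type} (x0 x1 : α) (xs : List α) (d : α) : PySem.List.pyGetD (x0::x1::xs) 1 d = x1 := by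
  rw [PySem.List.pyGetD_eq_getElem _ _ (by omega) (by simp only [List.length_cons]; push_cast; omega)]; rfl
theorem pg2 {α : Type} (x0 x1 x2 : α) (xs : List α) (d : α) : PySem.List.pyGetD (x0::x1::x2::xs) 2 d = x2 := by
  rw [PySem.List.pyGetD_eq_getElem _ _ (by omega) (by simp only [List.length_cons]; push_cast; omega)]; rfl
theorem pg3 {α : Type} (x0 x1 x2 x3 : α) (xs : List α) (d : α) : PySem.List.pyGetD (x0::x1::x2::x3::xs) 3 d = x3 := by
  rw [PySem.List.pyGetD_eq_getElem _ _ (by omega) (by simp only [List.length_cons]; push_cast; omega)]; rfl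
theorem ps0 {α : Type} (x0 : α) (xs : List α) (v : α) : PySem.List.pySetD (x0::xs) 0 v = v::xs := by
  rw [PySem.List.pySetD_of_nonneg _ _ (by omega)]; rfl
theorem ps1 {α : Type} (x0 x1 : α) (xs : List α) (v : α) : PySem.List.pySetD (x0::x1::xs) 1 v = x0::v::xs := by
  rw [PySem.List.pySetD_of_nonneg _ _ (by omega)]; rfl
theorem ps2 {α : Type} (x0 x1 x2 : α) (xs : List α) (v : α) : PySem.List.pySetD (x0::x1::x2::xs) 2 v = x0::x1::v::xs := by
  rw [PySem.List.pySetD_of_nonneg _ _ (by omega)]; rfl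
theorem ps3 {α : Type} (x0 x1 x2 x3 : α) (xs : List α) (v : α) : PySem.List.pySetD (x0::x1::x2::x3::xs) 3 v = x0::x1::x2::v::xs := by
  rw [PySem.List.pySetD_of_nonneg _ _ (by omega)]; rfl

-- one iteration of the loop body on a formation of the required shape: each of the six cycle
-- cells receives the next cell's value
theorem vbStep_shape (a0 a1 : Int) (a' : List Int) (b0 b1 b2 : Int) (b' : List Int)
    (c0 c1 : Int) (c' : List Int) (d0 d1 d2 : Int) (d' : List Int) (rest : List (List Int)) :
    vbStep ((a0::a1::a') :: (b0::b1::b2::b') :: (c0::c1::c') :: (d0::d1::d2::d') :: rest)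
      = ((a0::b2::a') :: (a1::b1::d2::b') :: (c0::d0::c') :: (b0::d1::c1::d') :: rest) := by
  simp only [vbStep, vbG, vbS, pg1, pg2, pg3, ps0, ps1, ps2, ps3, PySem.List.pyGetD_zero_cons]

-- ===== VERDICT (by name: the statement is the Claim_ definition above) =====
theorem volleyballPositions_spec : Claim_equal_volleyballPositions := by
  intro f k _ hpre
  unfold Spec_volleyballPositions
  have he : PySem.Int.mod k 6 = k % 6 := PySem.Int.mod_eq_emod_of_pos (by omega)
  have hlo : 0 ≤ k % 6 := Int.emod_nonneg k (by omega)
  have hhi : k % 6 < 6 := Int.emod_lt_of_pos k (by omega)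
  rcases (by omega : k % 6 = 0 ∨ k % 6 = 1 ∨ k % 6 = 2 ∨ k % 6 = 3 ∨ k % 6 = 4 ∨ k % 6 = 5)
    with h | h | h | h | h | h <;> rw [h] at he
  · simp only [volleyballPositions, volleyballPositions_alt, he]
    norm_num [PySem.List.pyRange_one]
  all_goals
  · rcases hpre with h0 | ⟨hl, h1, h2, h3, h4⟩
    · omega
    rcases f with _ | ⟨r0, f⟩; · simp at hl
    rcases f with _ | ⟨r1, f⟩; · simp at hl
    rcases f with _ | ⟨r2, f⟩; · simp at hl
    rcases f with _ | ⟨r3, rest⟩; · simp at hl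
    simp only [List.getD, List.getElem?_cons_zero, List.getElem?_cons_succ, Option.getD_some] at h1 h2 h3 h4
    rcases r0 with _ | ⟨a0, r0⟩; · simp at h1
    rcases r0 with _ | ⟨a1, a'⟩; · simp at h1
    rcases r1 with _ | ⟨b0, r1⟩; · simp at h2
    rcases r1 with _ | ⟨b1, r1⟩; · simp at h2
    rcases r1 with _ | ⟨b2, b'⟩; · simp at h2
    rcases r2 with _ | ⟨c0, r2⟩; · simp at h3
    rcases r2 with _ | ⟨c1, c'⟩; · simp at h3
    rcases r3 with _ | ⟨d0, r3⟩; · simp at h4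
    rcases r3 with _ | ⟨d1, r3⟩; · simp at h4
    rcases r3 with _ | ⟨d2, d'⟩; · simp at h4
    simp only [volleyballPositions, volleyballPositions_alt, he]
    norm_num [PySem.List.pyRange_one, List.range_succ, Int.toNat, vbStep_shape,
      PySem.List.slice, List.zip, List.zipWith, pg1, pg2, pg3, ps0, ps1, ps2, ps3,
      PySem.List.pyGetD_zero_cons]
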